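-- pv_equiv track=rewrite | github.com/bentossell/bentos | internal/assets/pos/skills/linear/scripts/sync.py | parse_issues_text
-- ===== SOURCE A (Python) =====
-- from typing import Any
--
-- def parse_issues_text(output: str) -> list[dict[str, Any]]:
-- 	issues: list[dict[str, Any]] = []
-- 	current: dict[str, Any] | None = None
-- 	for raw in output.splitlines():
-- 		line = raw.rstrip('\n')
-- 		if not line.strip():
-- 			if current:
-- 				issues.append(current)
-- 				current = None
-- 			continue
-- 		if line.startswith('Total:'):
-- 			continue
-- 		if ' - ' in line and not line.startswith('  '):
-- 			# New issue header: "ABC-123 - Title"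
-- 			identifier, title = line.split(' - ', 1)
-- 			current = {
-- 				'identifier': identifier.strip(),
-- 				'title': title.strip(),
-- 				'assignee': 'me',
-- 			}
-- 			continue
-- 		if not current:
-- 			continue
-- 		if line.strip().startswith('Status:'):
-- 			# Status: Name (type)
-- 			val = line.split('Status:', 1)[1].strip()
-- 			current['status'] = val
-- 			continue
-- 		if line.strip().startswith('Team:'):
-- 			current['team'] = line.split('Team:', 1)[1].strip()
-- 			continue
-- 		if line.strip().startswith('Assignee:'):
-- 			current['assignee_name'] = line.split('Assignee:', 1)[1].strip()
-- 			continue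
-- 		if line.strip().startswith('ID:'):
-- 			current['id'] = line.split('ID:', 1)[1].strip()
-- 			continue
-- 		if line.strip().startswith('State ID:'):
-- 			current['state_id'] = line.split('State ID:', 1)[1].strip()
-- 			continue
-- 		if line.strip().startswith('Description:'):
-- 			current['description_preview'] = line.split('Description:', 1)[1].strip()
-- 			continue
--
-- 	if current:
-- 		issues.append(current)
-- 	return issues
-- ===== SOURCE B (Python) =====
-- _FIELDS = [
--     ('Status:', 'status'),
--     ('Team:', 'team'),
--     ('Assignee:', 'assignee_name'),
--     ('ID:', 'id'),
--     ('State ID:', 'state_id'),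
--     ('Description:', 'description_preview'),
-- ]
--
-- def _parse_block(block):
--     current = None
--     for line in block:
--         if line.startswith('Total:'):
--             continue
--         if ' - ' in line and not line.startswith('  '):
--             identifier, title = line.split(' - ', 1)
--             current = {'identifier': identifier.strip(),
--                        'title': title.strip(),
--                        'assignee': 'me'}
--             continue
--         if current is None:
--             continue
--         stripped = line.strip()
--         for prefix, key in _FIELDS:
--             if stripped.startswith(prefix):
--                 current[key] = line.split(prefix, 1)[1].strip()
--                 break
--     return current
--
-- def parse_issues_text(output: str) -> list:
--     issues = []
--     lines = output.splitlines()
--     i, n = 0, len(lines)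
--     while i < n:
--         if not lines[i].strip():
--             i += 1
--             continue
--         j = i
--         while j < n and lines[j].strip():
--             j += 1
--         current = _parse_block(lines[i:j])
--         if current is not None:
--             issues.append(current)
--         i = j
--     return issues
-- ===== Notes on version B (the rewrite author's own statement) =====
-- stated objective: alternative
-- what changed: A threads one (issues, current) state through a single line loop with flush-on-blank; B first splits the lines into maximal blank-separated blocks and parses each block independently with a local dict, replacing the six-way if/elif field chain by a prefix-to-key table lookup.
import Mathlib
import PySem

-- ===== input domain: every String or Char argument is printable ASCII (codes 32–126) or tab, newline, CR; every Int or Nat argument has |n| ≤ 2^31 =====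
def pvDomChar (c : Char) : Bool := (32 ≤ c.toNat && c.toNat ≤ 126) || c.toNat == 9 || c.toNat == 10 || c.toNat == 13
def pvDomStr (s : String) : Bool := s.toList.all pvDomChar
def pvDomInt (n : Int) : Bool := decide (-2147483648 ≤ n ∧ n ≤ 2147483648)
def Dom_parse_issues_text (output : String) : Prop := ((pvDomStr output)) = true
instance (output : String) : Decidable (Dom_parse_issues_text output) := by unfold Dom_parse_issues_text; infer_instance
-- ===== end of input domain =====

-- B re-decomposes A's single stateful line loop into independent blank-separated blocks,
-- each parsed locally with a prefix→key table (objective: alternative decomposition, same cost).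

-- ===== PORT A =====
def pvRstripNl (s : String) : String :=
  String.ofList ((s.toList.reverse.dropWhile (fun c => c == '\n')).reverse)
def pvFieldVal (line pfx : String) : String :=
  match PySem.Str.splitMax? line pfx 1 with
  | some (_ :: v :: _) => PySem.Str.strip v
  | _ => ""
def pvStepA (st : List (List (String × String)) × Option (PySem.Dict String String)) (raw : String) :
    List (List (String × String)) × Option (PySem.Dict String String) :=
  let line := pvRstripNl raw
  if PySem.Str.strip line = "" then
    match st.2 with
    | some c => if c.items.isEmpty then st else (st.1 ++ [c.items], none)
    | none => st
  else if PySem.Str.startswith line "Total:" then st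
  else if PySem.Str.isIn " - " line && !(PySem.Str.startswith line "  ") then
    match PySem.Str.splitMax? line " - " 1 with
    | some (identifier :: title :: _) =>
        (st.1, some (PySem.Dict.ofList
          [("identifier", PySem.Str.strip identifier),
           ("title", PySem.Str.strip title),
           ("assignee", "me")]))
    | _ => st
  else
    match st.2 with
    | none => st
    | some c =>
      let s := PySem.Str.strip line
      if PySem.Str.startswith s "Status:" then (st.1, some (c.insert "status" (pvFieldVal line "Status:")))
      else if PySem.Str.startswith s "Team:" then (st.1, some (c.insert "team" (pvFieldVal line "Team:")))
      else if PySem.Str.startswith s "Assignee:" then (st.1, some (c.insert "assignee_name" (pvFieldVal line "Assignee:")))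
      else if PySem.Str.startswith s "ID:" then (st.1, some (c.insert "id" (pvFieldVal line "ID:")))
      else if PySem.Str.startswith s "State ID:" then (st.1, some (c.insert "state_id" (pvFieldVal line "State ID:")))
      else if PySem.Str.startswith s "Description:" then (st.1, some (c.insert "description_preview" (pvFieldVal line "Description:")))
      else st

def parse_issues_text (output : String) : List (List (String × String)) :=
  let st := (PySem.Str.splitlines output).foldl pvStepA ([], none)
  match st.2 with
  | some c => if c.items.isEmpty then st.1 else st.1 ++ [c.items]
  | none => st.1

-- ===== PORT B =====
def pvFields : List (String × String) :=
  [("Status:", "status"), ("Team:", "team"), ("Assignee:", "assignee_name"),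
   ("ID:", "id"), ("State ID:", "state_id"), ("Description:", "description_preview")]
def pvBlockStep (cur : Option (PySem.Dict String String)) (line : String) :
    Option (PySem.Dict String String) :=
  if PySem.Str.startswith line "Total:" then cur
  else if PySem.Str.isIn " - " line && !(PySem.Str.startswith line "  ") then
    match PySem.Str.splitMax? line " - " 1 with
    | some (identifier :: title :: _) =>
        some (PySem.Dict.ofList
          [("identifier", PySem.Str.strip identifier),
           ("title", PySem.Str.strip title),
           ("assignee", "me")])
    | _ => cur
  else
    match cur with
    | none => none
    | some c =>
      let stripped := PySem.Str.strip line
      match pvFields.find? (fun pk => PySem.Str.startswith stripped pk.1) with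
      | some (pfx, key) => some (c.insert key (pvFieldVal line pfx))
      | none => some c

def pvParseBlock (block : List String) : Option (PySem.Dict String String) :=
  block.foldl pvBlockStep none

def pvGoB : List String → List (List (String × String))
  | [] => []
  | l :: ls =>
    if PySem.Str.strip l = "" then pvGoB ls
    else
      (match pvParseBlock (l :: ls.takeWhile (fun x => !(PySem.Str.strip x == ""))) with
       | some c => [c.items]
       | none => []) ++ pvGoB (ls.dropWhile (fun x => !(PySem.Str.strip x == "")))
  termination_by l => l.length
  decreasing_by
  · simp
  · simp only [List.length_cons]
    exact Nat.lt_succ_of_le (List.length_dropWhile_le _ _)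


def parse_issues_text_alt (output : String) : List (List (String × String)) :=
  pvGoB (PySem.Str.splitlines output)

-- ===== PRECONDITION & SPEC =====
def Spec_parse_issues_text (output : String) (out : List (List (String × String))) : Prop := out = parse_issues_text_alt output
instance (output : String) (out : List (List (String × String))) : Decidable (Spec_parse_issues_text output out) := by unfold Spec_parse_issues_text; infer_instance

-- ===== CLAIM (what is proved, stated in full; the proofs are below) =====
def Claim_equal_parse_issues_text : Prop := ∀ (output : String), Dom_parse_issues_text output → Spec_parse_issues_text output (parse_issues_text output)

-- ===== LEMMAS AND PROOFS =====

-- every line splitlines produces is free of line-break characters (in particular '\n')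
theorem pv_splitlines_go_no_break (isB : Char → Bool) (s cur : List Char) (acc : List (List Char)) :
    (∀ c ∈ cur, isB c = false) → (∀ l ∈ acc, ∀ c ∈ l, isB c = false) →
    ∀ l ∈ PySem.Chars.splitlines.go isB s cur acc, ∀ c ∈ l, isB c = false := by
  fun_induction PySem.Chars.splitlines.go isB s cur acc with
  | case1 cur acc h =>
    intro hcur hacc l hl
    exact hacc l (List.mem_reverse.mp hl)
  | case2 cur acc h =>
    intro hcur hacc l hl
    rcases List.mem_cons.mp (List.mem_reverse.mp hl) with h' | h'
    · subst h'; intro c hc; exact hcur c (List.mem_reverse.mp hc)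
    · exact hacc l h'
  | case3 rest cur acc ih =>
    intro hcur hacc
    refine ih (by simp) ?_
    intro l hl
    rcases List.mem_cons.mp hl with h' | h'
    · subst h'; intro c hc; exact hcur c (List.mem_reverse.mp hc)
    · exact hacc l h'
  | case4 c rest cur acc hx hB ih =>
    intro hcur hacc
    refine ih (by simp) ?_
    intro l hl
    rcases List.mem_cons.mp hl with h' | h'
    · subst h'; intro d hd; exact hcur d (List.mem_reverse.mp hd)
    · exact hacc l h'
  | case5 c rest cur acc hx hB ih =>
    intro hcur hacc
    refine ih ?_ hacc
    intro d hd
    rcases List.mem_cons.mp hd with h' | h'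
    · subst h'; exact Bool.not_eq_true _ ▸ (by simpa using hB)
    · exact hcur d h'

theorem pv_splitlines_no_nl (output : String) :
    ∀ l ∈ PySem.Str.splitlines output, ('\n' : Char) ∉ l.toList := by
  intro l hl
  simp only [PySem.Str.splitlines, List.mem_map] at hl
  obtain ⟨cs, hcs, rfl⟩ := hl
  intro hmem
  have h := pv_splitlines_go_no_break _ _ [] [] (by simp) (by simp) cs hcs '\n' (by simpa using hmem)
  simp at h

theorem pv_rstrip_id (s : String) (h : ('\n' : Char) ∉ s.toList) : pvRstripNl s = s := by
  unfold pvRstripNl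
  have : s.toList.reverse.dropWhile (fun c => c == '\n') = s.toList.reverse := by
    cases hr : s.toList.reverse with
    | nil => simp
    | cons c t =>
      have hc : c ∈ s.toList := List.mem_reverse.mp (hr ▸ List.mem_cons_self ..)
      have : ¬ (c == '\n') = true := by
        simp only [beq_iff_eq]; rintro rfl; exact h hc
      simp [this]
  rw [this, List.reverse_reverse, String.ofList_toList]

set_option maxHeartbeats 1000000 in
theorem pv_step_nonblank (iss : List (List (String × String))) (cur : Option (PySem.Dict String String))
    (raw : String) (hnl : ('\n' : Char) ∉ raw.toList) (hnb : ¬ PySem.Str.strip raw = "") :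
    pvStepA (iss, cur) raw = (iss, pvBlockStep cur raw) := by
  simp only [pvStepA, pvBlockStep, pv_rstrip_id raw hnl, if_neg hnb]
  cases hT : PySem.Str.startswith raw "Total:" with
  | true => simp
  | false =>
    cases hH : (PySem.Str.isIn " - " raw && !PySem.Str.startswith raw "  ") with
    | true =>
      rcases hs : PySem.Str.splitMax? raw " - " 1 with _ | ⟨_ | ⟨a, _ | ⟨b, t⟩⟩⟩ <;> simp
    | false =>
      cases cur with
      | none => simp
      | some c =>
        simp only [Bool.false_eq_true, if_false, pvFields, List.find?_cons, List.find?_nil]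
        cases h3 : PySem.Str.startswith (PySem.Str.strip raw) "Status:" <;>
        cases h4 : PySem.Str.startswith (PySem.Str.strip raw) "Team:" <;>
        cases h5 : PySem.Str.startswith (PySem.Str.strip raw) "Assignee:" <;>
        cases h6 : PySem.Str.startswith (PySem.Str.strip raw) "ID:" <;>
        cases h7 : PySem.Str.startswith (PySem.Str.strip raw) "State ID:" <;>
        cases h8 : PySem.Str.startswith (PySem.Str.strip raw) "Description:" <;>
        simp

theorem pv_insert_ne_nil {κ ν : Type} [BEq κ] (d : PySem.Dict κ ν) (k : κ) (v : ν) :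
    (d.insert k v).items ≠ [] := by
  rw [PySem.Dict.items_insert]
  split
  · rename_i hcon
    intro hnil
    rw [List.map_eq_nil_iff] at hnil
    rw [PySem.Dict.contains] at hcon
    simp [hnil] at hcon
  · simp

theorem pv_blockStep_nonempty (cur : Option (PySem.Dict String String)) (line : String)
    (h : ∀ c, cur = some c → c.items ≠ []) :
    ∀ c', pvBlockStep cur line = some c' → c'.items ≠ [] := by
  intro c' hc'
  unfold pvBlockStep at hc'
  split at hc'
  · exact h c' hc'
  · split at hc'
    · split at hc'
      · cases hc'
        simp [PySem.Dict.ofList, PySem.Dict.update, PySem.Dict.insert, PySem.Dict.empty,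
          PySem.Dict.contains]
      · exact h c' hc'
    · cases cur with
      | none => cases hc'
      | some c =>
        simp only at hc'
        split at hc'
        · cases hc'; apply pv_insert_ne_nil
        · cases hc'; exact h _ rfl

theorem pv_block_nonempty (block : List String) (cur : Option (PySem.Dict String String))
    (h : ∀ c, cur = some c → c.items ≠ []) :
    ∀ c, block.foldl pvBlockStep cur = some c → c.items ≠ [] := by
  induction block generalizing cur with
  | nil => simpa using h
  | cons l ls ih =>
    intro c hc
    exact ih (pvBlockStep cur l) (pv_blockStep_nonempty cur l h) c hc

theorem pv_fold_nonblank (block : List String) (iss : List (List (String × String)))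
    (cur : Option (PySem.Dict String String))
    (h : ∀ l ∈ block, ('\n' : Char) ∉ l.toList ∧ ¬ PySem.Str.strip l = "") :
    block.foldl pvStepA (iss, cur) = (iss, block.foldl pvBlockStep cur) := by
  induction block generalizing cur with
  | nil => rfl
  | cons l ls ih =>
    obtain ⟨hnl, hnb⟩ := h l (by simp)
    simp only [List.foldl_cons, pv_step_nonblank iss cur l hnl hnb]
    exact ih _ (fun x hx => h x (by simp [hx]))

def pvFinalize (st : List (List (String × String)) × Option (PySem.Dict String String)) :
    List (List (String × String)) :=
  match st.2 with
  | some c => if c.items.isEmpty then st.1 else st.1 ++ [c.items]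
  | none => st.1

def pvEmit : Option (PySem.Dict String String) → List (List (String × String))
  | some c => [c.items]
  | none => []

theorem pv_step_blank (iss : List (List (String × String))) (cur : Option (PySem.Dict String String))
    (raw : String) (hnl : ('\n' : Char) ∉ raw.toList) (hb : PySem.Str.strip raw = "")
    (h : ∀ c, cur = some c → c.items ≠ []) :
    pvStepA (iss, cur) raw = (iss ++ pvEmit cur, none) := by
  simp only [pvStepA, pv_rstrip_id raw hnl, if_pos hb]
  cases cur with
  | none => simp [pvEmit]
  | some c =>
    have : c.items.isEmpty = false := by
      cases hc : c.items with
      | nil => exact absurd hc (h c rfl)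
      | cons a t => simp
    simp [this, pvEmit]

theorem pv_finalize_emit (iss : List (List (String × String)))
    (cur : Option (PySem.Dict String String)) (h : ∀ c, cur = some c → c.items ≠ []) :
    pvFinalize (iss, cur) = iss ++ pvEmit cur := by
  cases cur with
  | none => simp [pvFinalize, pvEmit]
  | some c =>
    have : c.items.isEmpty = false := by
      cases hc : c.items with
      | nil => exact absurd hc (h c rfl)
      | cons a t => simp
    simp [pvFinalize, pvEmit, this]

theorem pv_main (lines : List String) (hnl : ∀ l ∈ lines, ('\n' : Char) ∉ l.toList)
    (iss : List (List (String × String))) :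
    pvFinalize (lines.foldl pvStepA (iss, none)) = iss ++ pvGoB lines := by
  fun_induction pvGoB lines generalizing iss with
  | case1 => simp [pvFinalize]
  | case2 l ls hb ih =>
    rw [List.foldl_cons, pv_step_blank iss none l (hnl l (by simp)) hb (by simp)]
    simpa [pvEmit] using ih (fun x hx => hnl x (by simp [hx])) iss
  | case3 l ls hb ih =>
    set p : String → Bool := fun x => !(PySem.Str.strip x == "") with hp
    set t := ls.takeWhile p with ht
    set d := ls.dropWhile p with hd
    have hblock : ∀ x ∈ l :: t, ('\n' : Char) ∉ x.toList ∧ ¬ PySem.Str.strip x = "" := by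
      intro x hx
      rcases List.mem_cons.mp hx with rfl | hx
      · exact ⟨hnl x (by simp), hb⟩
      · refine ⟨hnl x (by simp [(List.takeWhile_sublist p).mem (ht ▸ hx)]), ?_⟩
        have := List.mem_takeWhile_imp (ht ▸ hx)
        simpa [hp] using this
    have hsplit : l :: ls = (l :: t) ++ d := by
      simp [ht, hd, List.takeWhile_append_dropWhile]
    have hcurB : ∀ c, pvParseBlock (l :: t) = some c → c.items ≠ [] :=
      pv_block_nonempty _ _ (by simp)
    rw [hsplit, List.foldl_append, pv_fold_nonblank _ iss none hblock,
      show List.foldl pvBlockStep none (l :: t) = pvParseBlock (l :: t) from rfl]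
    have hdnl : ∀ x ∈ d, ('\n' : Char) ∉ x.toList := by
      intro x hx
      exact hnl x (by simp [(List.dropWhile_sublist p).mem (hd ▸ hx)])
    cases hdc : d with
    | nil =>
      simp only [List.foldl_nil]
      rw [pv_finalize_emit _ _ hcurB]
      cases pvParseBlock (l :: t) <;> simp [pvEmit, pvGoB]
    | cons b d' =>
      have hbblank : PySem.Str.strip b = "" := by
        have := List.head_dropWhile_not p (l := ls)
        rw [← hd, hdc] at this
        simpa [hp] using this (by simp)
      rw [List.foldl_cons, pv_step_blank iss _ b (hdnl b (by simp [hdc])) hbblank hcurB]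
      have := ih (fun x hx => hdnl x (hd ▸ hx)) (iss ++ pvEmit (pvParseBlock (l :: t)))
      rw [hdc, List.foldl_cons,
        pv_step_blank _ none b (hdnl b (by simp [hdc])) hbblank (by simp)] at this
      simp only [show pvEmit none = [] from rfl, List.append_nil] at this
      rw [this]
      cases pvParseBlock (l :: t) <;> simp [pvEmit, pvGoB, hbblank]

-- ===== VERDICT (by name: the statement is the Claim_ definition above) =====
theorem parse_issues_text_spec : Claim_equal_parse_issues_text := by
  intro output _
  unfold Spec_parse_issues_text parse_issues_text parse_issues_text_alt
  have := pv_main (PySem.Str.splitlines output) (pv_splitlines_no_nl output) []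
  simpa [pvFinalize] using this
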